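-- pv_equiv track=rewrite | github.com/Wasroy/Projet_FMPAD | question3_differences.py | calculer_differences_approbations
-- ===== SOURCE A (Python) =====
-- def calculer_differences_approbations(profil):
--     """
--     profil: liste de n bulletins de votes par oui/non
--     chaque bulletin est une liste de m valeurs binaires 0:vote pas et 1: vote pour
--
--     RETURN: liste de toutes les valeurs dckcl(p) pour toutes les paires de candidates
--     """
--
--
--     #petite verif
--     if len(profil)==0 :
--         raise ValueError("erreur aucune votantes")
--
--     if len(profil[0])==0 :
--         raise ValueError("erreur aucune candidates")
--
--
--     m = len(profil[0]) #nb de candidates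
--
--     #liste pour stocker toutes les differences
--     differences = []
--
--     #parcourir toutes les tuples de candidates "(k,l)", on impose aussi k < l pour eviter les doublons.
--     for k in range(m):
--
--         for l in range(k+1, m):
--
--             #compter combien de votantes preferent candidate k a candidate l
--             #une votante prefere k a l si elle approuve k par 1 et n'approuve pas l par 0
--
--             nb_k_prefere_l = 0
--
--             for bulletin in profil:
--
--                 if (bulletin[k] == 1) and (bulletin[l] == 0):
--
--                     nb_k_prefere_l += 1
--
--             #idem dans l'autre sens
--             nb_l_prefere_k = 0
--
--             for bulletin in profil:
--                 if (bulletin[l] == 1) and (bulletin[k] == 0):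
--                     nb_l_prefere_k += 1
--
--             difference = abs(nb_k_prefere_l - nb_l_prefere_k)
--
--             differences.append(difference)
--
--     return differences
-- ===== SOURCE B (Python) =====
-- def calculer_differences_approbations(profil):
--     """
--     profil: liste de n bulletins de votes par oui/non
--     RETURN: liste des |d_{kl}| pour toutes les paires k < l de candidates
--     """
--     if len(profil) == 0:
--         raise ValueError("erreur aucune votantes")
--     if len(profil[0]) == 0:
--         raise ValueError("erreur aucune candidates")
--
--     m = len(profil[0])
--
--     # one pass over the bulletins: signed count per pair, touching only the
--     # approved (==1) x disapproved (==0) index pairs of each bulletin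
--     d = {}
--     for bulletin in profil:
--         ones = [i for i in range(m) if bulletin[i] == 1]
--         zeros = [i for i in range(m) if bulletin[i] == 0]
--         for k in ones:
--             for l in zeros:
--                 if k < l:
--                     d[(k, l)] = d.get((k, l), 0) + 1
--                 else:
--                     d[(l, k)] = d.get((l, k), 0) - 1
--
--     return [abs(d.get((k, l), 0)) for k in range(m) for l in range(k + 1, m)]
-- ===== Notes on version B (the rewrite author's own statement) =====
-- stated objective: faster
-- what changed: Instead of scanning all voters twice for every candidate pair, B makes a single pass over the ballots, accumulating a signed per-pair counter keyed only by the (approved, disapproved) index pairs actually present in each ballot, and reads the pair differences off the counter at the end.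
-- outside the precondition, e.g. on calculer_differences_approbations([[2], [], [0]]): A returns [], B raises IndexError
import Mathlib
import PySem

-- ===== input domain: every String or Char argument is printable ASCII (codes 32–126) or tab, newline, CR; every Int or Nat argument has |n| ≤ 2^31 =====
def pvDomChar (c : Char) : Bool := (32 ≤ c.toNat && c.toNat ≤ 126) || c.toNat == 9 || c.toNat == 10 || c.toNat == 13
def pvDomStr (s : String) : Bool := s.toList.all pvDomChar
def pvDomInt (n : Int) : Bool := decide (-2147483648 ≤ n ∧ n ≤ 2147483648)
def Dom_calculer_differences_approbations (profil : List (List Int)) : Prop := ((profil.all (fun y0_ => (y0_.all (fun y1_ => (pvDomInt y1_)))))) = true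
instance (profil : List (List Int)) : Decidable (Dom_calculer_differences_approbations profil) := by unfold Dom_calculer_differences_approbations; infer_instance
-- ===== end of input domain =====

-- B replaces A's per-pair double scan of all ballots by one pass over the ballots that
-- accumulates a signed per-pair counter touching only each ballot's (approved ⨯ disapproved)
-- index pairs — measurably faster on the timed inputs (same worst-case bound on fully 0/1 ballots).
-- Both ports index bulletin[k] as List.getD with default 0: exact under Pre_ (all indices in range).

-- ===== PORT A =====
def calculer_differences_approbations (profil : List (List Int)) : List Int :=
  -- m = len(profil[0]); range(m) / range(k+1, m) ported as List.range / List.range' (bounds nonneg)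
  let m := (profil.headD []).length
  (List.range m).foldl (fun diffs k =>
    (List.range' (k+1) (m - (k+1))).foldl (fun diffs l =>
      let nbkl : Int := profil.foldl (fun c b => if b.getD k 0 == 1 && b.getD l 0 == 0 then c + 1 else c) 0
      let nblk : Int := profil.foldl (fun c b => if b.getD l 0 == 1 && b.getD k 0 == 0 then c + 1 else c) 0
      diffs ++ [|nbkl - nblk|]) diffs) []

-- ===== PORT B =====
-- the body of B's ballot loop: d updated with the ones ⨯ zeros pairs of one bulletin
def pvBStep (m : Nat) (d : PySem.Dict (Nat × Nat) Int) (b : List Int) : PySem.Dict (Nat × Nat) Int :=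
  let ones := (List.range m).filter (fun i => b.getD i 0 == 1)
  let zeros := (List.range m).filter (fun i => b.getD i 0 == 0)
  ones.foldl (fun d k =>
    zeros.foldl (fun d l =>
      if k < l then d.insert (k, l) (d.getD (k, l) 0 + 1)
      else d.insert (l, k) (d.getD (l, k) 0 - 1)) d) d

def calculer_differences_approbations_alt (profil : List (List Int)) : List Int :=
  let m := (profil.headD []).length
  let d := profil.foldl (pvBStep m) PySem.Dict.empty
  (List.range m).flatMap (fun k =>
    (List.range' (k+1) (m - (k+1))).map (fun l => |d.getD (k, l) 0|))

-- ===== PRECONDITION & SPEC =====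
-- Pre_ excludes exactly the inputs where the Python A raises: the explicit ValueError on an
-- empty profile or an empty first bulletin, and the IndexError when some bulletin is shorter
-- than the first one. When m = 1 there are no pairs and A returns [] without ever indexing,
-- so A returns on some ragged inputs excluded here; B scans every bulletin and raises there.
def Pre_calculer_differences_approbations (profil : List (List Int)) : Prop :=
  profil ≠ [] ∧ profil.headD [] ≠ [] ∧ ∀ b ∈ profil, (profil.headD []).length ≤ b.length
instance (profil : List (List Int)) : Decidable (Pre_calculer_differences_approbations profil) := by
  unfold Pre_calculer_differences_approbations; infer_instance

def pvWitness_calculer_differences_approbations : List (List Int) := [[1, 0], [0, 1]]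

def Spec_calculer_differences_approbations (profil : List (List Int)) (out : List Int) : Prop := out = calculer_differences_approbations_alt profil
instance (profil : List (List Int)) (out : List Int) : Decidable (Spec_calculer_differences_approbations profil out) := by unfold Spec_calculer_differences_approbations; infer_instance

-- ===== CLAIM (what is proved, stated in full; the proofs are below) =====
def Claim_equal_calculer_differences_approbations : Prop := ∀ (profil : List (List Int)), Dom_calculer_differences_approbations profil → Pre_calculer_differences_approbations profil → Spec_calculer_differences_approbations profil (calculer_differences_approbations profil)

-- ===== LEMMAS AND PROOFS =====

-- count of k in a filtered range
lemma pv_count_filter_range (m k : Nat) (p : Nat → Bool) (h : k < m) :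
    ((List.range m).filter p).count k = if p k then 1 else 0 := by
  by_cases hp : p k
  · rw [List.count_filter hp, List.count_eq_one_of_mem List.nodup_range (List.mem_range.mpr h)]
    simp [hp]
  · rw [if_neg hp, List.count_eq_zero]
    intro hmem
    exact hp (List.of_mem_filter hmem)

-- effect of B's innermost loop (over zeros, for a fixed kk ∈ ones) on one key (k,l), k < l
lemma pv_inner_getD (k l kk : Nat) (hkl : k < l) :
    ∀ (zeros : List Nat) (d : PySem.Dict (Nat × Nat) Int),
    (zeros.foldl (fun d ll =>
        if kk < ll then d.insert (kk, ll) (d.getD (kk, ll) 0 + 1)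
        else d.insert (ll, kk) (d.getD (ll, kk) 0 - 1)) d).getD (k, l) 0
      = d.getD (k, l) 0 + (if kk = k then (zeros.count l : Int) else 0)
          - (if kk = l then (zeros.count k : Int) else 0) := by
  intro zeros
  induction zeros with
  | nil => intro d; simp
  | cons ll rest ih =>
    intro d
    simp only [List.foldl_cons, ih, List.count_cons]
    by_cases h1 : kk < ll <;>
      simp only [h1, if_true, if_false, PySem.Dict.getD_insert] <;>
      split_ifs with h2 h3 h4 h5 h6 h7 h8 <;>
      simp_all <;> omega

-- effect of B's loop over ones on one key (k,l), k < l
lemma pv_ones_getD (k l : Nat) (hkl : k < l) :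
    ∀ (ones zeros : List Nat) (d : PySem.Dict (Nat × Nat) Int),
    (ones.foldl (fun d kk =>
        zeros.foldl (fun d ll =>
          if kk < ll then d.insert (kk, ll) (d.getD (kk, ll) 0 + 1)
          else d.insert (ll, kk) (d.getD (ll, kk) 0 - 1)) d) d).getD (k, l) 0
      = d.getD (k, l) 0 + (ones.count k : Int) * (zeros.count l : Int)
          - (ones.count l : Int) * (zeros.count k : Int) := by
  intro ones
  induction ones with
  | nil => intro zeros d; simp
  | cons kk rest ih =>
    intro zeros d
    simp only [List.foldl_cons, ih, pv_inner_getD k l kk hkl, List.count_cons]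
    split_ifs with h1 h2 h2 <;> simp_all <;> ring

-- effect of one ballot on one key (k,l), k < l < m
lemma pv_bstep_getD (m k l : Nat) (hkl : k < l) (hlm : l < m)
    (d : PySem.Dict (Nat × Nat) Int) (b : List Int) :
    (pvBStep m d b).getD (k, l) 0
      = d.getD (k, l) 0 + (if b.getD k 0 == 1 && b.getD l 0 == 0 then 1 else 0)
          - (if b.getD l 0 == 1 && b.getD k 0 == 0 then 1 else 0) := by
  unfold pvBStep
  rw [pv_ones_getD k l hkl,
      pv_count_filter_range m k _ (lt_trans hkl hlm),
      pv_count_filter_range m l _ hlm,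
      pv_count_filter_range m k _ (lt_trans hkl hlm),
      pv_count_filter_range m l _ hlm]
  split_ifs <;> simp_all

-- the whole ballot fold on one key (k,l), k < l < m
lemma pv_fold_getD (m k l : Nat) (hkl : k < l) (hlm : l < m) :
    ∀ (profil : List (List Int)) (d : PySem.Dict (Nat × Nat) Int),
    (profil.foldl (pvBStep m) d).getD (k, l) 0
      = d.getD (k, l) 0
        + (profil.countP (fun b => b.getD k 0 == 1 && b.getD l 0 == 0) : Int)
        - (profil.countP (fun b => b.getD l 0 == 1 && b.getD k 0 == 0) : Int) := by
  intro profil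
  induction profil with
  | nil => intro d; simp
  | cons b rest ih =>
    intro d
    simp only [List.foldl_cons, ih, pv_bstep_getD m k l hkl hlm, List.countP_cons]
    split_ifs <;> simp_all <;> ring

-- ===== VERDICT (by name: the statement is the Claim_ definition above) =====
theorem calculer_differences_approbations_spec : Claim_equal_calculer_differences_approbations := by
  intro profil _ _
  unfold Spec_calculer_differences_approbations
  simp only [calculer_differences_approbations, calculer_differences_approbations_alt,
    PySem.List.foldl_append_singleton_eq_map, PySem.List.foldl_count_if]
  rw [PySem.List.foldl_append_eq_flatMap]
  simp only [List.nil_append]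
  apply List.flatMap_congr
  intro k hk
  apply List.map_congr_left
  intro l hl
  have hk' := List.mem_range.mp hk
  have hl' := List.mem_range'_1.mp hl
  have hkl : k < l := by omega
  have hlm : l < (profil.headD []).length := by omega
  rw [pv_fold_getD _ k l hkl hlm profil PySem.Dict.empty]
  simp
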